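-- pv_equiv track=rewrite | github.com/yeojingi/coding_test | topcoder/CorproationSalary_226.py | solution
-- ===== SOURCE A (Python) =====
-- def solution(relations):
--   salaries = [0] * len(relations)
--
--   def recur(n):
--     if "Y" not in relations[n]:
--       salaries[n] = 1
--       return 1
--
--     if salaries[n] != 0:
--       return salaries[n]
--
--     for i in range(0, len(relations[n])):
--       if relations[n][i] == "Y":
--         salaries[n] += recur(i)
--
--     return salaries[n]
--
--   for i in range(len(relations)):
--     recur(i)
--
--   return sum(salaries)
-- ===== SOURCE B (Python) =====
-- def solution(relations):
--     n = len(relations)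
--     subs = [[j for j in range(len(row)) if row[j] == "Y"] for row in relations]
--     sal = [0] * n
--     for _ in range(n):
--         new = [1 if not subs[m] else sum(sal[j] for j in subs[m]) for m in range(n)]
--         if new == sal:
--             break
--         sal = new
--     return sum(sal)
-- ===== Notes on version B (the rewrite author's own statement) =====
-- stated objective: alternative
-- what changed: Replaced the memoized recursive DFS that mutates a shared salaries array with an iterative bottom-up DP: subordinate index lists are built once, then a salary table is repeatedly relaxed (leaf rows get 1, others the sum of their subordinates' current salaries) until it reaches its fixed point (at most n rounds, which suffices on any acyclic relation); the answer is the table's sum. Pre_ restricts to the problem's natural domain: every 'Y' column index must be a valid employee index and the manager graph must be acyclic; …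
-- outside the precondition, e.g. on solution(['N', 'YY']): A returns 3, B returns 2; on solution(['Y']): A does not finish within the time limit, B returns 0
import Mathlib
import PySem

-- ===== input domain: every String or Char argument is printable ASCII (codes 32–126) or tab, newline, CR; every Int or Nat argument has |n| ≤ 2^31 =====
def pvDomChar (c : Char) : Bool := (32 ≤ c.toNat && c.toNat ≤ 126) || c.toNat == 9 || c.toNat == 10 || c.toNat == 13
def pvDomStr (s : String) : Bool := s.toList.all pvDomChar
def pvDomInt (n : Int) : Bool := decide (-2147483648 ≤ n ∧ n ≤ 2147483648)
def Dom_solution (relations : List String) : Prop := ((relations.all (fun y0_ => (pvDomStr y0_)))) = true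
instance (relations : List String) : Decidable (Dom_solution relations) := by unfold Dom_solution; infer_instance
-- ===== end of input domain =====

-- B replaces A's memoized recursive DFS (mutating a shared array) by an iterative bottom-up
-- DP: n rounds of table relaxation over precomputed subordinate lists (objective: alternative).

-- shared helper: the subordinate indices of one row (columns holding 'Y')
def subsOf (row : List Char) : List Nat :=
  (List.range row.length).filter (fun j => row.getD j ' ' = 'Y')

-- ===== PORT A =====
def recurA (rel : List String) : Nat → List Int → Nat → List Int × Int
  | 0, sal, _ => (sal, 0)
  | f+1, sal, m =>
    let row := (rel.getD m "").toList
    if ¬ row.contains 'Y' then (sal.set m 1, 1)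
    else if sal.getD m 0 ≠ 0 then (sal, sal.getD m 0)
    else
      let sal' := (List.range row.length).foldl (fun s i =>
        if row.getD i ' ' = 'Y' then
          let p := recurA rel f s i
          p.1.set m (p.1.getD m 0 + p.2)
        else s) sal
      (sal', sal'.getD m 0)

def solution (relations : List String) : Int :=
  ((List.range relations.length).foldl
      (fun s i => (recurA relations relations.length s i).1)
      (List.replicate relations.length 0)).sum

-- ===== PORT B =====
-- the round loop of Source B, with its fixed-point early exit ('if new == sal: break')
def loopB (n : Nat) (subs : List (List Nat)) : Nat → List Int → List Int
  | 0, sal => sal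
  | f+1, sal =>
    let new := (List.range n).map (fun m =>
      let s := subs.getD m []
      if s.isEmpty then 1 else (s.map (fun j => sal.getD j 0)).sum)
    if new = sal then sal else loopB n subs f new

def solution_alt (relations : List String) : Int :=
  let n := relations.length
  let subs := relations.map (fun row => subsOf row.toList)
  (loopB n subs n (List.replicate n 0)).sum

-- ===== PRECONDITION & SPEC =====
-- longB rel f a = true iff the manager graph of rel has a directed path of f edges starting at a
def longB (rel : List String) : Nat → Nat → Bool
  | 0, _ => true
  | f+1, a => (subsOf ((rel.getD a "").toList)).any (fun c => longB rel f c)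

-- Pre_ restricts to the problem's natural domain: every 'Y' column index is a valid employee
-- index and the manager graph is acyclic (no path of n edges); outside it A raises
-- RecursionError/IndexError or, on some cyclic inputs, returns an accidental partial-memo value.
def Pre_solution (relations : List String) : Prop :=
  (∀ m < relations.length, ∀ i ∈ subsOf ((relations.getD m "").toList), i < relations.length) ∧
  (∀ m < relations.length, longB relations relations.length m = false)

instance (relations : List String) : Decidable (Pre_solution relations) := by
  unfold Pre_solution; infer_instance

def pvWitness_solution : List String := ["NYY", "NNN", "NNN"]

def Spec_solution (relations : List String) (out : Int) : Prop := out = solution_alt relations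
instance (relations : List String) (out : Int) : Decidable (Spec_solution relations out) := by
  unfold Spec_solution; infer_instance

-- ===== CLAIM (what is proved, stated in full; the proofs are below) =====
def Claim_equal_solution : Prop :=
  ∀ (relations : List String), Dom_solution relations → Pre_solution relations →
    Spec_solution relations (solution relations)

-- ===== LEMMAS AND PROOFS =====

-- reachB rel f a b = true iff b is reachable from a by a nonempty path of at most f edges
def reachB (rel : List String) : Nat → Nat → Nat → Bool
  | 0, _, _ => false
  | f+1, a, b => (subsOf ((rel.getD a "").toList)).any (fun c => c = b || reachB rel f c b)

-- SalF rel f m : the salary of m computed by fuel-bounded structural recursion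
def SalF (rel : List String) : Nat → Nat → Int
  | 0, _ => 0
  | f+1, m =>
    let s := subsOf ((rel.getD m "").toList)
    if s.isEmpty then 1 else (s.map (fun i => SalF rel f i)).sum

theorem mem_subsOf {row : List Char} {i : Nat} :
    i ∈ subsOf row ↔ i < row.length ∧ row.getD i ' ' = 'Y' := by
  simp [subsOf]

theorem contains_iff_subsOf (row : List Char) :
    row.contains 'Y' = true ↔ subsOf row ≠ [] := by
  rw [List.contains_iff_mem]
  constructor
  · intro h
    obtain ⟨i, hi, e⟩ := List.mem_iff_getElem.1 h
    have : i ∈ subsOf row := mem_subsOf.2 ⟨hi, by rw [List.getD_eq_getElem row ' ' hi, e]⟩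
    exact fun hn => by simp [hn] at this
  · intro h
    obtain ⟨i, hi⟩ := List.exists_mem_of_ne_nil _ h
    obtain ⟨h1, h2⟩ := mem_subsOf.1 hi
    rw [List.getD_eq_getElem row ' ' h1] at h2
    exact h2 ▸ List.getElem_mem h1









theorem longB_succ_false {rel : List String} {f m i : Nat}
    (h : longB rel (f+1) m = false) (hi : i ∈ subsOf ((rel.getD m "").toList)) :
    longB rel f i = false := by
  simp [longB, List.any_eq_false] at h
  exact h i hi

theorem SalF_stable (rel : List String) :
    ∀ f g m, longB rel f m = false → f ≤ g → SalF rel g m = SalF rel f m := by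
  intro f
  induction f with
  | zero => intro g m h; simp [longB] at h
  | succ f ih =>
    intro g m h hle
    obtain ⟨g2, rfl⟩ : ∃ g2, g = g2 + 1 := ⟨g - 1, by omega⟩
    simp only [SalF]
    split
    · rfl
    · congr 1
      apply List.map_congr_left
      intro i hi
      exact ih g2 i (longB_succ_false h hi) (by omega)

theorem one_le_sum_list {l : List Int} (hne : l ≠ []) (h1 : ∀ x ∈ l, 1 ≤ x) : 1 ≤ l.sum := by
  cases l with
  | nil => simp at hne
  | cons a t =>
    have ha : 1 ≤ a := h1 a (by simp)
    have ht : 0 ≤ t.sum := List.sum_nonneg (fun x hx => by linarith [h1 x (by simp [hx])])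
    simp only [List.sum_cons]; linarith

theorem one_le_SalF (rel : List String) :
    ∀ f m, longB rel f m = false → 1 ≤ SalF rel f m := by
  intro f
  induction f with
  | zero => intro m h; simp [longB] at h
  | succ f ih =>
    intro m h
    simp only [SalF]
    split
    · exact le_refl 1
    · rename_i hne
      apply one_le_sum_list
      · simpa [List.isEmpty_iff] using hne
      · intro x hx
        obtain ⟨i, hi, rfl⟩ := List.mem_map.1 hx
        exact ih i (longB_succ_false h hi)

theorem loopLong (rel : List String) {K m : Nat} (hK : reachB rel K m m = true) :
    ∀ f a k, reachB rel k a m = true → longB rel f a = true := by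
  intro f
  induction f with
  | zero => intro a k _; simp [longB]
  | succ f ih =>
    intro a k h
    cases k with
    | zero => simp [reachB] at h
    | succ k =>
      simp only [reachB, List.any_eq_true, Bool.or_eq_true, decide_eq_true_eq] at h
      obtain ⟨c, hc, hcase⟩ := h
      simp only [longB, List.any_eq_true]
      refine ⟨c, hc, ?_⟩
      rcases hcase with rfl | hreach
      · exact ih c K hK
      · exact ih c k hreach

theorem reach_back_long {rel : List String} {m i k f : Nat}
    (hi : i ∈ subsOf ((rel.getD m "").toList)) (h : reachB rel k i m = true) :
    longB rel f m = true := by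
  have hmm : reachB rel (k+1) m m = true := by
    simp only [reachB, List.any_eq_true, Bool.or_eq_true, decide_eq_true_eq]
    exact ⟨i, hi, Or.inr h⟩
  exact loopLong rel hmm f m (k+1) hmm


theorem getD_set_self' (l : List Int) (m : Nat) (x : Int) (h : m < l.length) :
    (l.set m x).getD m 0 = x := by
  rw [List.getD_eq_getElem _ _ (by simpa using h)]
  simp [List.getElem_set_self]

theorem getD_set_ne' (l : List Int) (m j : Nat) (x : Int) (h : j ≠ m) :
    (l.set m x).getD j 0 = l.getD j 0 := by
  simp [List.getD, List.getElem?_set_ne (h := (Ne.symm h))]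

theorem reach_one {rel : List String} {m i : Nat}
    (hi : i ∈ subsOf ((rel.getD m "").toList)) {f : Nat} :
    reachB rel (f+1) m i = true := by
  simp only [reachB, List.any_eq_true, Bool.or_eq_true, decide_eq_true_eq]
  exact ⟨i, hi, Or.inl rfl⟩

theorem reach_step {rel : List String} {m i j f : Nat}
    (hi : i ∈ subsOf ((rel.getD m "").toList)) (h : reachB rel f i j = true) :
    reachB rel (f+1) m j = true := by
  simp only [reachB, List.any_eq_true, Bool.or_eq_true, decide_eq_true_eq]
  exact ⟨i, hi, Or.inr h⟩

theorem fold_inner (rel : List String)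
    (hR : ∀ m < rel.length, ∀ i ∈ subsOf ((rel.getD m "").toList), i < rel.length)
    (f m : Nat) (hm : m < rel.length) (hlong : longB rel (f+1) m = false)
    (ih : ∀ m' (sal' : List Int), m' < rel.length → f ≤ rel.length →
      longB rel f m' = false → sal'.length = rel.length →
      (∀ j < rel.length, (j = m' ∨ reachB rel f m' j = true) →
        sal'.getD j 0 = 0 ∨ sal'.getD j 0 = SalF rel rel.length j) →
      (recurA rel f sal' m').2 = SalF rel rel.length m' ∧
      (recurA rel f sal' m').1.length = rel.length ∧
      (recurA rel f sal' m').1.getD m' 0 = SalF rel rel.length m' ∧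
      (∀ j < rel.length, (j = m' ∨ reachB rel f m' j = true) →
        (recurA rel f sal' m').1.getD j 0 = 0 ∨
        (recurA rel f sal' m').1.getD j 0 = SalF rel rel.length j) ∧
      (∀ j, ¬(j = m' ∨ reachB rel f m' j = true) →
        (recurA rel f sal' m').1.getD j 0 = sal'.getD j 0) ∧
      (∀ j, sal'.getD j 0 ≠ 0 → (recurA rel f sal' m').1.getD j 0 = sal'.getD j 0))
    (hf : f + 1 ≤ rel.length) :
    ∀ (L : List Nat) (sal : List Int),
      (∀ i ∈ L, i ∈ subsOf ((rel.getD m "").toList)) → sal.length = rel.length →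
      (∀ j < rel.length, j ≠ m → reachB rel (f+1) m j = true →
        sal.getD j 0 = 0 ∨ sal.getD j 0 = SalF rel rel.length j) →
      (L.foldl (fun s i => let p := recurA rel f s i; p.1.set m (p.1.getD m 0 + p.2)) sal).length
          = rel.length ∧
      (L.foldl (fun s i => let p := recurA rel f s i; p.1.set m (p.1.getD m 0 + p.2)) sal).getD m 0
          = sal.getD m 0 + (L.map (fun i => SalF rel rel.length i)).sum ∧
      (∀ j < rel.length, j ≠ m → reachB rel (f+1) m j = true →
        (L.foldl (fun s i => let p := recurA rel f s i; p.1.set m (p.1.getD m 0 + p.2)) sal).getD j 0 = 0 ∨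
        (L.foldl (fun s i => let p := recurA rel f s i; p.1.set m (p.1.getD m 0 + p.2)) sal).getD j 0 = SalF rel rel.length j) ∧
      (∀ j, ¬(j = m ∨ reachB rel (f+1) m j = true) →
        (L.foldl (fun s i => let p := recurA rel f s i; p.1.set m (p.1.getD m 0 + p.2)) sal).getD j 0 = sal.getD j 0) ∧
      (∀ j, j ≠ m → sal.getD j 0 ≠ 0 →
        (L.foldl (fun s i => let p := recurA rel f s i; p.1.set m (p.1.getD m 0 + p.2)) sal).getD j 0 = sal.getD j 0) := by
  intro L
  induction L with
  | nil =>
    intro sal _ hlen hinv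
    refine ⟨hlen, by simp, fun j hj hjm hr => hinv j hj hjm hr, fun j _ => rfl, fun j _ _ => rfl⟩
  | cons i L' ihL =>
    intro sal hsub hlen hinv
    have hi : i ∈ subsOf ((rel.getD m "").toList) := hsub i (by simp)
    have hin : i < rel.length := hR m hm i hi
    have hlf : longB rel f i = false := longB_succ_false hlong hi
    have hne : i ≠ m := by
      intro h
      subst h
      exact absurd (reach_back_long (f := f+1) hi (reach_one (f := 0) hi)) (by simp [hlong])
    have hnr : ¬ reachB rel f i m = true := by
      intro h
      exact absurd (reach_back_long (f := f+1) hi h) (by simp [hlong])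
    have hIH := ih i sal hin (by omega) hlf hlen ?_
    swap
    · intro j hj hsc
      have hjm : j ≠ m := by
        rcases hsc with rfl | hr
        · exact hne
        · intro h; subst h; exact hnr hr
      rcases hsc with rfl | hr
      · exact hinv j hj hjm (reach_one hi)
      · exact hinv j hj hjm (reach_step hi hr)
    obtain ⟨hv, hplen, hpm, hpInv, hpOut, hpKeep⟩ := hIH
    have hmOut : (recurA rel f sal i).1.getD m 0 = sal.getD m 0 := by
      apply hpOut
      intro h
      rcases h with h | h
      · exact hne h.symm
      · exact hnr h
    have hstep : (i :: L').foldl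
        (fun s i => let p := recurA rel f s i; p.1.set m (p.1.getD m 0 + p.2)) sal
        = L'.foldl (fun s i => let p := recurA rel f s i; p.1.set m (p.1.getD m 0 + p.2))
            ((recurA rel f sal i).1.set m ((recurA rel f sal i).1.getD m 0 + (recurA rel f sal i).2)) := rfl
    set salN := (recurA rel f sal i).1.set m ((recurA rel f sal i).1.getD m 0 + (recurA rel f sal i).2) with hsalN
    have hNlen : salN.length = rel.length := by simp [hsalN, hplen]
    have hNm : salN.getD m 0 = sal.getD m 0 + SalF rel rel.length i := by
      rw [hsalN, getD_set_self' _ _ _ (by rw [hplen]; exact hm), hmOut, hv]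
    have hNj : ∀ j, j ≠ m → salN.getD j 0 = (recurA rel f sal i).1.getD j 0 := by
      intro j hj; rw [hsalN, getD_set_ne' _ _ _ _ hj]
    have hIHL := ihL salN (fun x hx => hsub x (by simp [hx])) hNlen ?_
    swap
    · intro j hj hjm hr
      rw [hNj j hjm]
      by_cases hsc : j = i ∨ reachB rel f i j = true
      · exact hpInv j hj hsc
      · rw [hpOut j hsc]; exact hinv j hj hjm hr
    obtain ⟨rlen, rm, rInv, rOut, rKeep⟩ := hIHL
    rw [hstep]
    refine ⟨rlen, ?_, rInv, ?_, ?_⟩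
    · rw [rm, hNm]
      simp [add_assoc]
    · intro j hsc
      have hjm : j ≠ m := fun h => hsc (Or.inl h)
      rw [rOut j hsc, hNj j hjm, hpOut j ?_]
      intro h
      rcases h with rfl | h
      · exact hsc (Or.inr (reach_one hi))
      · exact hsc (Or.inr (reach_step hi h))
    · intro j hjm hnz
      have h1 : (recurA rel f sal i).1.getD j 0 = sal.getD j 0 := hpKeep j hnz
      rw [rKeep j hjm (by rw [hNj j hjm, h1]; exact hnz), hNj j hjm, h1]

theorem recurA_main (rel : List String)
    (hR : ∀ m < rel.length, ∀ i ∈ subsOf ((rel.getD m "").toList), i < rel.length) :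
    ∀ f m (sal : List Int), m < rel.length → f ≤ rel.length → longB rel f m = false →
      sal.length = rel.length →
      (∀ j < rel.length, (j = m ∨ reachB rel f m j = true) →
        sal.getD j 0 = 0 ∨ sal.getD j 0 = SalF rel rel.length j) →
      (recurA rel f sal m).2 = SalF rel rel.length m ∧
      (recurA rel f sal m).1.length = rel.length ∧
      (recurA rel f sal m).1.getD m 0 = SalF rel rel.length m ∧
      (∀ j < rel.length, (j = m ∨ reachB rel f m j = true) →
        (recurA rel f sal m).1.getD j 0 = 0 ∨
        (recurA rel f sal m).1.getD j 0 = SalF rel rel.length j) ∧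
      (∀ j, ¬(j = m ∨ reachB rel f m j = true) →
        (recurA rel f sal m).1.getD j 0 = sal.getD j 0) ∧
      (∀ j, sal.getD j 0 ≠ 0 → (recurA rel f sal m).1.getD j 0 = sal.getD j 0) := by
  intro f
  induction f with
  | zero => intro m sal _ _ hlong _ _; simp [longB] at hlong
  | succ f ih =>
    intro m sal hm hf hlong hlen hinv
    by_cases hc : ((rel.getD m "").toList).contains 'Y'
    · by_cases hz : sal.getD m 0 = 0
      · -- main branch
        have hsubne : subsOf ((rel.getD m "").toList) ≠ [] := (contains_iff_subsOf _).1 hc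
        have hred : recurA rel (f+1) sal m =
            (((subsOf ((rel.getD m "").toList)).foldl
                (fun s i => let p := recurA rel f s i; p.1.set m (p.1.getD m 0 + p.2)) sal),
             ((subsOf ((rel.getD m "").toList)).foldl
                (fun s i => let p := recurA rel f s i; p.1.set m (p.1.getD m 0 + p.2)) sal).getD m 0) := by
          have hfold : (subsOf ((rel.getD m "").toList)).foldl
              (fun s i => let p := recurA rel f s i; p.1.set m (p.1.getD m 0 + p.2)) sal
              = (List.range ((rel.getD m "").toList).length).foldl
                  (fun s i => if ((rel.getD m "").toList).getD i ' ' = 'Y' then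
                    let p := recurA rel f s i
                    p.1.set m (p.1.getD m 0 + p.2)
                  else s) sal := by
            rw [subsOf, List.foldl_filter]
            simp only [decide_eq_true_eq]
          simp only [recurA]
          rw [if_neg (not_not_intro hc), if_neg (not_not_intro hz), ← hfold]
        obtain ⟨rlen, rm, rInv, rOut, rKeep⟩ :=
          fold_inner rel hR f m hm hlong ih hf (subsOf ((rel.getD m "").toList)) sal
            (fun i h => h) hlen (fun j hj hjm hr => hinv j hj (Or.inr hr))
        have hsum : ((subsOf ((rel.getD m "").toList)).map
            (fun i => SalF rel rel.length i)).sum = SalF rel (f+1) m := by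
          simp only [SalF, List.isEmpty_iff]
          rw [if_neg hsubne]
          congr 1
          apply List.map_congr_left
          intro i hi
          exact SalF_stable rel f rel.length i (longB_succ_false hlong hi) (by omega)
        have hSm : SalF rel rel.length m = SalF rel (f+1) m :=
          SalF_stable rel (f+1) rel.length m hlong hf
        have hrm : ((subsOf ((rel.getD m "").toList)).foldl
            (fun s i => let p := recurA rel f s i; p.1.set m (p.1.getD m 0 + p.2)) sal).getD m 0
            = SalF rel rel.length m := by
          rw [rm, hz, zero_add, hsum, hSm]
        rw [hred]
        refine ⟨hrm, rlen, hrm, ?_, rOut, ?_⟩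
        · intro j hj hsc
          by_cases hjm : j = m
          · subst hjm; right; exact hrm
          · rcases hsc with h | hr
            · exact absurd h hjm
            · exact rInv j hj hjm hr
        · intro j hnz
          by_cases hjm : j = m
          · subst hjm; exact absurd hz hnz
          · exact rKeep j hjm hnz
      · -- memo branch
        have hred : recurA rel (f+1) sal m = (sal, sal.getD m 0) := by
          simp only [recurA]
          rw [if_neg (not_not_intro hc), if_pos hz]
        rw [hred]
        have hSm : sal.getD m 0 = SalF rel rel.length m := by
          rcases hinv m hm (Or.inl rfl) with h0 | h
          · exact absurd h0 hz
          · exact h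
        exact ⟨hSm, hlen, hSm, fun j hj hsc => hinv j hj hsc, fun _ _ => rfl, fun _ _ => rfl⟩
    · -- leaf branch
      have hempty : subsOf ((rel.getD m "").toList) = [] := by
        by_contra h; exact hc ((contains_iff_subsOf _).2 h)
      have hS : SalF rel rel.length m = 1 := by
        obtain ⟨n', hn'⟩ : ∃ n', rel.length = n' + 1 := ⟨rel.length - 1, by omega⟩
        rw [hn']
        simp only [SalF, List.isEmpty_iff]
        rw [if_pos hempty]
      have hred : recurA rel (f+1) sal m = (sal.set m 1, 1) := by
        simp only [recurA]
        rw [if_pos hc]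
      rw [hred]
      refine ⟨hS.symm, by simp [hlen], ?_, ?_, ?_, ?_⟩
      · rw [getD_set_self' _ _ _ (by rw [hlen]; exact hm), hS]
      · intro j hj hsc
        by_cases hjm : j = m
        · subst hjm; right
          rw [getD_set_self' _ _ _ (by rw [hlen]; exact hj), hS]
        · rw [getD_set_ne' _ _ _ _ hjm]; exact hinv j hj hsc
      · intro j hsc
        exact getD_set_ne' _ _ _ _ (fun h => hsc (Or.inl h))
      · intro j hnz
        by_cases hjm : j = m
        · have hnz' : sal.getD m 0 ≠ 0 := by rwa [hjm] at hnz
          rw [hjm, getD_set_self' _ _ _ (by rw [hlen]; exact hm)]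
          rcases hinv m hm (Or.inl rfl) with h0 | hSm
          · exact absurd h0 hnz'
          · exact (hSm.trans hS).symm
        · exact getD_set_ne' _ _ _ _ hjm



theorem loopB_eq_iterate (n : Nat) (subs : List (List Nat)) :
    ∀ (f : Nat) (sal : List Int), loopB n subs f sal =
      (fun sal => (List.range n).map (fun m =>
        let s := subs.getD m []
        if s.isEmpty then 1 else (s.map (fun j => sal.getD j 0)).sum))^[f] sal := by
  intro f
  induction f with
  | zero => intro sal; rfl
  | succ f ih =>
    intro sal
    simp only [loopB]
    split
    · rename_i hfix
      exact (Function.iterate_fixed hfix (f+1)).symm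
    · rw [ih, ← Function.iterate_succ_apply]

theorem solution_alt_eq (rel : List String) (hPre : Pre_solution rel) :
    solution_alt rel = ((List.range rel.length).map (SalF rel rel.length)).sum := by
  obtain ⟨hR, -⟩ := hPre
  have key : ∀ k, (fun sal =>
      (List.range rel.length).map (fun m =>
        let s := (rel.map (fun row => subsOf row.toList)).getD m []
        if s.isEmpty then 1 else (s.map (fun j => sal.getD j 0)).sum))^[k]
      (List.replicate rel.length 0) = (List.range rel.length).map (SalF rel k) := by
    intro k
    induction k with
    | zero =>
      simp only [Function.iterate_zero, id]
      apply List.ext_getElem <;> simp [SalF]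
    | succ k ih =>
      rw [Function.iterate_succ_apply', ih]
      apply List.map_congr_left
      intro m hm
      have hm' : m < rel.length := List.mem_range.1 hm
      have hsub : (rel.map (fun row => subsOf row.toList)).getD m [] =
          subsOf ((rel.getD m "").toList) := by
        rw [List.getD_eq_getElem _ _ (by simpa using hm'), List.getElem_map,
          List.getD_eq_getElem rel "" hm']
      simp only [hsub, SalF]
      split
      · rfl
      · congr 1
        apply List.map_congr_left
        intro j hj
        have hjn : j < rel.length := hR m hm' j hj
        rw [List.getD_eq_getElem _ _ (by simpa using hjn)]
        simp
  simp only [solution_alt]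
  rw [loopB_eq_iterate, key]


theorem topLoop (rel : List String) (hPre : Pre_solution rel) :
    ∀ (L : List Nat) (sal : List Int), (∀ i ∈ L, i < rel.length) → sal.length = rel.length →
      (∀ j < rel.length, sal.getD j 0 = 0 ∨ sal.getD j 0 = SalF rel rel.length j) →
      (L.foldl (fun s i => (recurA rel rel.length s i).1) sal).length = rel.length ∧
      (∀ j, sal.getD j 0 ≠ 0 →
        (L.foldl (fun s i => (recurA rel rel.length s i).1) sal).getD j 0 = sal.getD j 0) ∧
      (∀ i ∈ L, (L.foldl (fun s i => (recurA rel rel.length s i).1) sal).getD i 0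
        = SalF rel rel.length i) := by
  intro L
  induction L with
  | nil =>
    intro sal _ hlen _
    exact ⟨hlen, fun j _ => rfl, by simp⟩
  | cons i L' ihL =>
    intro sal hL hlen hglob
    have hi : i < rel.length := hL i (by simp)
    obtain ⟨hv, hplen, hpi, hpInv, hpOut, hpKeep⟩ :=
      recurA_main rel hPre.1 rel.length i sal hi (le_refl _) (hPre.2 i hi) hlen
        (fun j hj _ => hglob j hj)
    have hglob' : ∀ j < rel.length,
        (recurA rel rel.length sal i).1.getD j 0 = 0 ∨
        (recurA rel rel.length sal i).1.getD j 0 = SalF rel rel.length j := by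
      intro j hj
      by_cases hsc : j = i ∨ reachB rel rel.length i j = true
      · exact hpInv j hj hsc
      · rw [hpOut j hsc]; exact hglob j hj
    obtain ⟨rlen, rKeep, rAll⟩ := ihL (recurA rel rel.length sal i).1
      (fun x hx => hL x (by simp [hx])) hplen hglob'
    have hfold : (i :: L').foldl (fun s i => (recurA rel rel.length s i).1) sal
        = L'.foldl (fun s i => (recurA rel rel.length s i).1) (recurA rel rel.length sal i).1 := rfl
    refine ⟨by rw [hfold]; exact rlen, ?_, ?_⟩
    · intro j hnz
      rw [hfold, rKeep j (by rw [hpKeep j hnz]; exact hnz), hpKeep j hnz]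
    · intro x hx
      rcases List.mem_cons.1 hx with rfl | hx'
      · have hSpos : SalF rel rel.length x ≠ 0 := by
          have := one_le_SalF rel rel.length x (hPre.2 x hi)
          omega
        rw [hfold, rKeep x (by rw [hpi]; exact hSpos), hpi]
      · rw [hfold]; exact rAll x hx'

theorem solution_eq (rel : List String) (hPre : Pre_solution rel) :
    solution rel = ((List.range rel.length).map (SalF rel rel.length)).sum := by
  obtain ⟨rlen, -, rAll⟩ := topLoop rel hPre (List.range rel.length)
    (List.replicate rel.length 0) (fun i hi => List.mem_range.1 hi) (by simp)
    (fun j _ => Or.inl (by simp))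
  unfold solution
  congr 1
  apply List.ext_getElem
  · simp [rlen]
  · intro k h1 h2
    have hk : k < rel.length := by simpa using h2
    have hval := rAll k (List.mem_range.2 hk)
    rw [List.getD_eq_getElem _ _ (by rw [rlen]; exact hk)] at hval
    simpa using hval

-- ===== VERDICT (by name: the statement is the Claim_ definition above) =====
theorem solution_spec : Claim_equal_solution := by
  intro rel _ hPre
  unfold Spec_solution
  rw [solution_eq rel hPre, solution_alt_eq rel hPre]
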